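-- pv_equiv track=rewrite | github.com/hassan-abbasi01/hassan932 | backend/services/video_service.py | _merge_overlapping_segments_with_labels
-- ===== SOURCE A (Python) =====
-- def _merge_overlapping_segments_with_labels(segments):
--     """Merge overlapping time segments while preserving labels"""
--     if not segments:
--         return []
--
--     # Sort by start time
--     segments.sort(key=lambda x: x[0])
--     merged = [segments[0]]
--
--     for current in segments[1:]:
--         last = merged[-1]
--         if current[0] <= last[1] + 100:  # 100ms tolerance
--             # Merge segments - combine labels
--             merged_label = f"{last[2]}, {current[2]}"
--             merged[-1] = (last[0], max(last[1], current[1]), merged_label)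
--         else:
--             merged.append(current)
--
--     return merged
-- ===== SOURCE B (Python) =====
-- def _merge_overlapping_segments_with_labels(segments):
--     """Merge overlapping time segments while preserving labels.
--
--     Three staged passes: (1) annotate each segment after the first with a
--     chain-break flag computed from the GLOBAL running maximum of all previous
--     end times (equivalent to the per-chain maximum because the list is sorted
--     by start), (2) split the sorted list into chains at the flags, (3) render
--     each chain (a singleton chain keeps its original tuple).
--     """
--     if not segments:
--         return []
--
--     segments.sort(key=lambda x: x[0])
--
--     # Pass 1: flag chain breaks using the global prefix maximum of end times.
--     flagged = []
--     m = segments[0][1]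
--     for s in segments[1:]:
--         flagged.append((s[0] > m + 100, s))
--         m = max(m, s[1])
--
--     # Pass 2: split into chains at the flagged breaks.
--     chains = [[segments[0]]]
--     for is_break, s in flagged:
--         if is_break:
--             chains.append([s])
--         else:
--             chains[-1].append(s)
--
--     # Pass 3: render each chain.
--     return [c[0] if len(c) == 1 else
--             (c[0][0], max(s[1] for s in c), ", ".join(s[2] for s in c))
--             for c in chains]
-- ===== Notes on version B (the rewrite author's own statement) =====
-- stated objective: alternative
-- what changed: Replaces A's single sweep that rewrites merged[-1] in place with three staged passes: flag chain breaks using the GLOBAL prefix maximum of end times (a different invariant than A's per-chain running end, proved equivalent only thanks to sortedness), split the sorted list into chains at the flags, then render each chain at once.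
import Mathlib
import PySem

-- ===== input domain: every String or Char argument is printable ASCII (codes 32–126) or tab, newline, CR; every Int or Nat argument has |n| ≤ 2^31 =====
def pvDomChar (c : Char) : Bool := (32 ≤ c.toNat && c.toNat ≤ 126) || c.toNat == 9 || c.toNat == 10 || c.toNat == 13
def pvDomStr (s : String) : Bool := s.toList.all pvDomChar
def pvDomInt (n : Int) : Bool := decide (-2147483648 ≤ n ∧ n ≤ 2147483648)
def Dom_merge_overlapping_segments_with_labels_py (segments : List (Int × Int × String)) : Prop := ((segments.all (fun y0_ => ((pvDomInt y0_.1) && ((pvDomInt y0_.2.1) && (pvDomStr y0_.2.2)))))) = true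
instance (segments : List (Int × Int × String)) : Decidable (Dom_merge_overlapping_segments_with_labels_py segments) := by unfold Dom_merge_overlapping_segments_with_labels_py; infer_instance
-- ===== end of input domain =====

-- B replaces A's in-place rewriting of merged[-1] with three staged passes (flag breaks by the GLOBAL prefix max of ends, split into chains, render); same cost, return value proved equal (both sort the input list in place in Python).


-- ===== PORT A =====
-- A's loop: merged starts as [sorted[0]]; merged[-1] is read and rewritten (dropLast ++ [new]).
def mergeLoopA (merged : List (Int × Int × String)) : List (Int × Int × String) → List (Int × Int × String)
  | [] => merged
  | c :: rest =>
    match merged.getLast? with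
    | none => merged  -- unreachable: merged is never empty
    | some last =>
      if c.1 ≤ last.2.1 + 100 then
        mergeLoopA (merged.dropLast ++ [(last.1, max last.2.1 c.2.1, last.2.2 ++ ", " ++ c.2.2)]) rest
      else
        mergeLoopA (merged ++ [c]) rest

def merge_overlapping_segments_with_labels_py (segments : List (Int × Int × String)) : List (Int × Int × String) :=
  if segments.isEmpty then [] else
  match PySem.List.sorted segments (fun x => x.1) false with
  | [] => []  -- unreachable: sorted preserves length
  | h :: t => mergeLoopA [h] t

-- ===== PORT B =====
-- Pass 1: flag chain breaks using the global prefix maximum m of end times.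
def flagB (m : Int) : List (Int × Int × String) → List (Bool × (Int × Int × String))
  | [] => []
  | s :: rest => (decide (s.1 > m + 100), s) :: flagB (max m s.2.1) rest

-- Pass 2: split into chains at the flagged breaks (chains[-1].append(s) = rewrite last).
def splitB (chains : List (List (Int × Int × String))) :
    List (Bool × (Int × Int × String)) → List (List (Int × Int × String))
  | [] => chains
  | (isBreak, s) :: rest =>
    if isBreak then splitB (chains ++ [[s]]) rest
    else splitB (chains.dropLast ++ [(chains.getLast?.getD []) ++ [s]]) rest

-- Pass 3: render one chain (singleton kept verbatim).
def renderB (g : List (Int × Int × String)) : Int × Int × String :=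
  match g with
  | [] => (0, 0, "")  -- unreachable: chains are nonempty
  | [x] => x
  | x :: xs => (x.1, xs.foldl (fun m s => max m s.2.1) x.2.1,
      PySem.Str.join ", " ((x :: xs).map (fun s => s.2.2)))

def merge_overlapping_segments_with_labels_py_alt (segments : List (Int × Int × String)) : List (Int × Int × String) :=
  if segments.isEmpty then [] else
  match PySem.List.sorted segments (fun x => x.1) false with
  | [] => []  -- unreachable
  | h :: t => (splitB [[h]] (flagB h.2.1 t)).map renderB

-- ===== PRECONDITION & SPEC =====
def Spec_merge_overlapping_segments_with_labels_py (segments : List (Int × Int × String)) (out : List (Int × Int × String)) : Prop := out = merge_overlapping_segments_with_labels_py_alt segments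
instance (segments : List (Int × Int × String)) (out : List (Int × Int × String)) : Decidable (Spec_merge_overlapping_segments_with_labels_py segments out) := by unfold Spec_merge_overlapping_segments_with_labels_py; infer_instance

-- ===== CLAIM (what is proved, stated in full; the proofs are below) =====
def Claim_equal_merge_overlapping_segments_with_labels_py : Prop := ∀ (segments : List (Int × Int × String)), Dom_merge_overlapping_segments_with_labels_py segments → Spec_merge_overlapping_segments_with_labels_py segments (merge_overlapping_segments_with_labels_py segments)

-- ===== LEMMAS AND PROOFS =====

-- Intermediate form: chain grouping with the PER-CHAIN running end e (A's invariant).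
def groupsE (cur : List (Int × Int × String)) (e : Int) :
    List (Int × Int × String) → List (List (Int × Int × String))
  | [] => [cur]
  | s :: rest =>
    if s.1 ≤ e + 100 then groupsE (cur ++ [s]) (max e s.2.1) rest
    else cur :: groupsE [s] s.2.1 rest

-- Intermediate form: chain grouping with the GLOBAL running maximum m (B's invariant).
def groupsG (cur : List (Int × Int × String)) (m : Int) :
    List (Int × Int × String) → List (List (Int × Int × String))
  | [] => [cur]
  | s :: rest =>
    if s.1 ≤ m + 100 then groupsG (cur ++ [s]) (max m s.2.1) rest
    else cur :: groupsG [s] (max m s.2.1) rest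

def maxEnds (g : List (Int × Int × String)) : Int :=
  match g with
  | [] => 0
  | x :: xs => xs.foldl (fun m s => max m s.2.1) x.2.1

lemma maxEnds_snoc (g : List (Int × Int × String)) (c : Int × Int × String) (hg : g ≠ []) :
    maxEnds (g ++ [c]) = max (maxEnds g) c.2.1 := by
  match g with
  | [] => exact absurd rfl hg
  | x :: xs => simp [maxEnds, List.foldl_append]

lemma join_cons_cons (sep a b : String) (t : List String) :
    PySem.Str.join sep (a :: b :: t) = a ++ sep ++ PySem.Str.join sep (b :: t) := by
  simp [PySem.Str.join, PySem.Chars.join_cons_cons]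
  apply String.toList_injective
  simp

lemma join_singleton (sep a : String) : PySem.Str.join sep [a] = a := by
  simp [PySem.Str.join, PySem.Chars.join_singleton]

lemma join_snoc (sep x : String) (l : List String) (hl : l ≠ []) :
    PySem.Str.join sep (l ++ [x]) = PySem.Str.join sep l ++ sep ++ x := by
  induction l with
  | nil => exact absurd rfl hl
  | cons a t ih =>
    match t with
    | [] => simp [join_cons_cons, join_singleton]
    | b :: t' =>
      have h := ih (by simp)
      simp only [List.cons_append] at h ⊢
      rw [join_cons_cons sep a b (t' ++ [x]), h, join_cons_cons sep a b t']
      simp [String.append_assoc]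

lemma renderB_end (g : List (Int × Int × String)) (hg : g ≠ []) :
    (renderB g).2.1 = maxEnds g := by
  match g with
  | [] => exact absurd rfl hg
  | [x] => simp [renderB, maxEnds]
  | x :: y :: xs => simp [renderB, maxEnds]

lemma renderB_snoc (g : List (Int × Int × String)) (c : Int × Int × String) (hg : g ≠ []) :
    renderB (g ++ [c]) =
      ((renderB g).1, max (renderB g).2.1 c.2.1, (renderB g).2.2 ++ ", " ++ c.2.2) := by
  match g with
  | [] => exact absurd rfl hg
  | [x] => simp [renderB, join_cons_cons, join_singleton]
  | x :: y :: xs =>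
    simp only [renderB, List.cons_append, List.map_append, List.map]
    refine Prod.ext rfl (Prod.ext ?_ ?_)
    · simp [List.foldl_append]
    · rw [show (y.2.2 :: (xs.map (fun s => s.2.2) ++ [c.2.2]))
           = (y.2.2 :: xs.map (fun s => s.2.2)) ++ [c.2.2] by simp]
      rw [show (x.2.2 :: ((y.2.2 :: xs.map (fun s => s.2.2)) ++ [c.2.2]))
           = (x.2.2 :: y.2.2 :: xs.map (fun s => s.2.2)) ++ [c.2.2] by simp]
      rw [join_snoc _ _ _ (by simp)]

-- 1. A's loop builds exactly the rendered per-chain groups.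
lemma loop_eq (rest : List (Int × Int × String)) :
    ∀ (acc g : List (Int × Int × String)), g ≠ [] →
    mergeLoopA (acc ++ [renderB g]) rest = acc ++ (groupsE g (maxEnds g) rest).map renderB := by
  induction rest with
  | nil => intro acc g hg; simp [mergeLoopA, groupsE]
  | cons c rest ih =>
    intro acc g hg
    have hlast : (acc ++ [renderB g]).getLast? = some (renderB g) := by simp
    simp only [mergeLoopA, hlast]
    by_cases h : c.1 ≤ (renderB g).2.1 + 100
    · rw [if_pos h, List.dropLast_concat, ← renderB_snoc g c hg,
        ih acc (g ++ [c]) (by simp), maxEnds_snoc g c hg]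
      simp only [groupsE]
      rw [if_pos (by rwa [renderB_end g hg] at h)]
    · rw [if_neg h]
      rw [show acc ++ [renderB g] ++ [c] = (acc ++ [renderB g]) ++ [renderB [c]] by
        simp [renderB]]
      rw [ih (acc ++ [renderB g]) [c] (by simp)]
      simp only [groupsE]
      rw [if_neg (by rwa [renderB_end g hg] at h)]
      simp [maxEnds]

-- 2. The heart: on a start-sorted tail, the per-chain running end e and the global
-- prefix maximum m make the SAME break decisions, so the chains coincide.
lemma groupsE_eq_groupsG (t : List (Int × Int × String)) :
    ∀ (cur : List (Int × Int × String)) (e m : Int),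
    t.Pairwise (fun a b => a.1 ≤ b.1) → e ≤ m →
    (∀ s ∈ t, e + 100 < s.1 ↔ m + 100 < s.1) →
    groupsE cur e t = groupsG cur m t := by
  induction t with
  | nil => intro cur e m _ _ _; rfl
  | cons s rest ih =>
    intro cur e m hpw hem hiff
    have hs := hiff s (by simp)
    have hpw' := (List.pairwise_cons.mp hpw).2
    have hhead := (List.pairwise_cons.mp hpw).1
    simp only [groupsE, groupsG]
    by_cases h : s.1 ≤ e + 100
    · have hm : s.1 ≤ m + 100 := by by_contra hc; exact absurd ((hs.mpr (by omega))) (by omega)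
      rw [if_pos h, if_pos hm]
      refine ih (cur ++ [s]) _ _ hpw' (by omega) ?_
      intro u hu
      have := hiff u (by simp [hu])
      constructor <;> intro <;> omega
    · have hm : ¬ s.1 ≤ m + 100 := by
        intro hc; exact h (hs.mp (by omega) |> fun x => by omega)
      rw [if_neg h, if_neg hm]
      refine congrArg (cur :: ·) (ih [s] _ _ hpw' (by omega) ?_)
      intro u hu
      have hus : s.1 ≤ u.1 := hhead u hu
      have hmu : m + 100 < s.1 := by omega
      constructor <;> intro <;> simp only [max_def] at * <;> split_ifs at * <;> omega

-- 3. B's split pass over B's flag pass computes exactly the global-max chains.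
lemma split_flag_eq (rest : List (Int × Int × String)) :
    ∀ (acc : List (List (Int × Int × String))) (cur : List (Int × Int × String)) (m : Int),
    splitB (acc ++ [cur]) (flagB m rest) = acc ++ groupsG cur m rest := by
  induction rest with
  | nil => intro acc cur m; simp [flagB, splitB, groupsG]
  | cons s rest ih =>
    intro acc cur m
    simp only [flagB, splitB, groupsG]
    by_cases h : s.1 ≤ m + 100
    · rw [if_neg (by simpa using h), if_pos h]
      rw [show acc ++ [cur] = (acc ++ [cur]).dropLast ++ [(acc ++ [cur]).getLast?.getD []] from ?_] at *
      · simp only [List.dropLast_concat, List.getLast?_append, List.getLast?_singleton]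
        exact ih acc (cur ++ [s]) (max m s.2.1)
      · simp
    · rw [if_pos (by simpa using h), if_neg h]
      rw [show acc ++ [cur] ++ [[s]] = (acc ++ [cur]) ++ [[s]] by simp]
      rw [ih (acc ++ [cur]) [s] (max m s.2.1)]
      simp

-- ===== VERDICT (by name: the statement is the Claim_ definition above) =====
theorem merge_overlapping_segments_with_labels_py_spec : Claim_equal_merge_overlapping_segments_with_labels_py := by
  intro segments _
  unfold Spec_merge_overlapping_segments_with_labels_py
  unfold merge_overlapping_segments_with_labels_py merge_overlapping_segments_with_labels_py_alt
  by_cases hs : segments.isEmpty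
  · simp [hs]
  · simp only [hs, if_neg, Bool.false_eq_true, not_false_iff]
    cases hsort : PySem.List.sorted segments (fun x => x.1) false with
    | nil => rfl
    | cons h t =>
      have hpw : (h :: t).Pairwise (fun a b => a.1 ≤ b.1) := by
        rw [← hsort]; exact PySem.List.sorted_pairwise segments (fun x => x.1)
      have h1 := loop_eq t [] [h] (by simp)
      have h2 := groupsE_eq_groupsG t [h] h.2.1 h.2.1 (List.pairwise_cons.mp hpw).2
        (le_refl _) (fun s _ => Iff.rfl)
      have h3 := split_flag_eq t [] [h] h.2.1
      simp only [List.nil_append] at h1 h3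
      show mergeLoopA [h] t = (splitB [[h]] (flagB h.2.1 t)).map renderB
      rw [show mergeLoopA [h] t = mergeLoopA [renderB [h]] t by simp [renderB]]
      rw [h1]; simp only [maxEnds, List.foldl_nil]
      rw [h2, ← h3]
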